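-- pv_equiv track=rewrite | github.com/pypi-data/pypi-mirror-28 | packages/another-jira-cli/another_jira_cli-0.14.3-py3-none-any.whl/jira_cli/jirahelpers.py | construct_jql_string_from_saved_searches
-- ===== SOURCE A (Python) =====
-- def construct_jql_string_from_saved_searches(search_strings):
--     """
--     Takes a list of jira JQL strings, and creates a resulting JQL search
--     string from it by combining all the original ones.
--
--     ORDER BY clauses are handled by using the last one encountered (right
--     now, the requirement is that max. 1 ORDER BY clause should be present
--     in the original search strings).
--
--     Basically the resulting string is:
--
--     (SEARCH1) [AND (SEARCH2)...] [ORDER BY last-order-by-clause]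
--
--     :param search_strings: A list of JQL search strings
--     :return: A final JQL search string
--     """
--
--     def transf(x):
--         idx = x.lower().find("order by")
--         if idx > -1:
--             return x[:idx].strip()
--         else:
--             return x
--
--     order_clause = ""
--
--     # extract "the" order clause
--     for search_string in search_strings:
--         idx = search_string.lower().find("order by")
--         if idx > -1:
--             order_clause = search_string[idx:].strip()
--
--     # two steps in one: map strings and filter out empty ones
--     use_queries = filter(lambda x: x, map(transf, search_strings))
--
--     # add brackets around each string to combine with AND later
--     use_queries = map(lambda x: "(" + x + ")", use_queries)
--
--     # join them :)
--     jql_string = " AND ".join(use_queries) + " " + order_clause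
--
--     # done, return.
--     return jql_string.strip()
-- ===== SOURCE B (Python) =====
-- def construct_jql_string_from_saved_searches(search_strings):
--     # One reversed traversal: the first 'order by' seen from the end wins, and the
--     # combined query is assembled back-to-front by direct string concatenation
--     # (no intermediate list, no filter/map/join).
--     joined = ""
--     order_clause = ""
--     seen_order = False
--     for s in reversed(search_strings):
--         idx = s.lower().find("order by")
--         if idx > -1:
--             if not seen_order:
--                 order_clause = s[idx:].strip()
--                 seen_order = True
--             body = s[:idx].strip()
--         else:
--             body = s
--         if body:
--             joined = "(" + body + ")" + (" AND " + joined if joined else "")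
--     return (joined + " " + order_clause).strip()
-- ===== Notes on version B (the rewrite author's own statement) =====
-- stated objective: alternative
-- what changed: Replaces A's staged passes (forward last-wins order-clause loop, then map/filter/map and a join) with one reversed traversal: the first 'order by' seen from the end wins, and the query is assembled back-to-front by direct string concatenation with explicit ' AND ' separators (no intermediate list, no filter/map/join); the direct concatenation trades large-input speed (quadratic copying) for a single traversal with no intermediate structures.
import Mathlib
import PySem

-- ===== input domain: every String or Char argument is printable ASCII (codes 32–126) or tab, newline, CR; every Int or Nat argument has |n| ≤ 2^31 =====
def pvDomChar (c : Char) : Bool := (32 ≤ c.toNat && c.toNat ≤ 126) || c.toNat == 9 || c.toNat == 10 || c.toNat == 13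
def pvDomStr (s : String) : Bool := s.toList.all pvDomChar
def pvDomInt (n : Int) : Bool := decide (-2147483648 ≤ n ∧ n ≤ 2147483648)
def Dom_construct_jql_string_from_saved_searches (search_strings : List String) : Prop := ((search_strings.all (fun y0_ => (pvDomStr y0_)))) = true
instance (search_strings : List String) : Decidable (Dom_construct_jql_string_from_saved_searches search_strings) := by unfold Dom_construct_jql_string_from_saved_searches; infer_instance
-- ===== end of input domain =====

-- B replaces A's staged passes (forward last-wins order-clause loop, map/filter/map, join) by one
-- REVERSED traversal: first 'order by' from the end wins, and the query is assembled back-to-front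
-- by direct string concatenation with explicit " AND " separators (no intermediate list, no join).

-- ===== PORT A =====
-- inner helper `transf` of A
def pvTransf (x : String) : String :=
  let idx := PySem.Str.find (PySem.Str.lower x) "order by"
  if idx > -1 then PySem.Str.strip (PySem.Str.slice x none (some idx)) else x

def construct_jql_string_from_saved_searches (search_strings : List String) : String :=
  -- extract "the" order clause (last one wins)
  let order_clause := search_strings.foldl (fun oc s =>
    let idx := PySem.Str.find (PySem.Str.lower s) "order by"
    if idx > -1 then PySem.Str.strip (PySem.Str.slice s (some idx) none) else oc) ""
  -- map strings and filter out empty ones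
  let use_queries := (search_strings.map pvTransf).filter (fun x => x ≠ "")
  -- add brackets around each string
  let use_queries2 := use_queries.map (fun x => "(" ++ x ++ ")")
  -- join, append order clause, strip
  PySem.Str.strip (PySem.Str.join " AND " use_queries2 ++ " " ++ order_clause)

-- ===== PORT B =====
-- B's reversed-loop body: state = (joined, order_clause, seen_order)
def pvStepB (st : String × String × Bool) (s : String) : String × String × Bool :=
  let joined := st.1
  let oc := st.2.1
  let seen := st.2.2
  let idx := PySem.Str.find (PySem.Str.lower s) "order by"
  if idx > -1 then
    let oc' := if seen then oc else PySem.Str.strip (PySem.Str.slice s (some idx) none)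
    let body := PySem.Str.strip (PySem.Str.slice s none (some idx))
    (if body = "" then joined
     else "(" ++ body ++ ")" ++ (if joined = "" then "" else " AND " ++ joined), oc', true)
  else
    (if s = "" then joined
     else "(" ++ s ++ ")" ++ (if joined = "" then "" else " AND " ++ joined), oc, seen)

def construct_jql_string_from_saved_searches_alt (search_strings : List String) : String :=
  let st := search_strings.reverse.foldl pvStepB ("", "", false)
  PySem.Str.strip (st.1 ++ " " ++ st.2.1)

-- ===== PRECONDITION & SPEC =====
def Spec_construct_jql_string_from_saved_searches (search_strings : List String) (out : String) : Prop := out = construct_jql_string_from_saved_searches_alt search_strings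
instance (search_strings : List String) (out : String) : Decidable (Spec_construct_jql_string_from_saved_searches search_strings out) := by unfold Spec_construct_jql_string_from_saved_searches; infer_instance

-- ===== CLAIM (what is proved, stated in full; the proofs are below) =====
def Claim_equal_construct_jql_string_from_saved_searches : Prop := ∀ (search_strings : List String), Dom_construct_jql_string_from_saved_searches search_strings → Spec_construct_jql_string_from_saved_searches search_strings (construct_jql_string_from_saved_searches search_strings)

-- ===== LEMMAS AND PROOFS =====

-- whether a string contains "order by" (case-insensitively)
def pvHit (s : String) : Bool := PySem.Str.find (PySem.Str.lower s) "order by" > -1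

-- first-hit scan for the order clause (what B's seen_order flag computes over the reversed list)
def pvOC : List String → String
  | [] => ""
  | s :: t =>
    let idx := PySem.Str.find (PySem.Str.lower s) "order by"
    if idx > -1 then PySem.Str.strip (PySem.Str.slice s (some idx) none) else pvOC t

-- right-fold view of B's back-to-front builder
def pvJoined : List String → String
  | [] => ""
  | s :: t =>
    let idx := PySem.Str.find (PySem.Str.lower s) "order by"
    let body := if idx > -1 then PySem.Str.strip (PySem.Str.slice s none (some idx)) else s
    let rest := pvJoined t
    if body = "" then rest
    else if rest ≠ "" then "(" ++ body ++ ")" ++ " AND " ++ rest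
    else "(" ++ body ++ ")"

-- the two independent components of B's loop state
def pvGJ (j : String) (s : String) : String :=
  let idx := PySem.Str.find (PySem.Str.lower s) "order by"
  let body := if idx > -1 then PySem.Str.strip (PySem.Str.slice s none (some idx)) else s
  if body = "" then j else "(" ++ body ++ ")" ++ (if j = "" then "" else " AND " ++ j)

def pvGO (p : String × Bool) (s : String) : String × Bool :=
  let idx := PySem.Str.find (PySem.Str.lower s) "order by"
  if idx > -1 then (if p.2 then p.1 else PySem.Str.strip (PySem.Str.slice s (some idx) none), true) else p

-- B's fold splits into the joined-string fold and the order-clause fold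
theorem stepB_split (l : List String) (j oc : String) (seen : Bool) :
    l.foldl pvStepB (j, oc, seen) = ((l.foldl pvGJ j, (l.foldl pvGO (oc, seen)).1, (l.foldl pvGO (oc, seen)).2)) := by
  induction l generalizing j oc seen with
  | nil => rfl
  | cons s t ih =>
    simp only [List.foldl_cons]
    rw [ih]
    by_cases h : -1 < PySem.Chars.find (PySem.Chars.lower s.toList) ['o','r','d','e','r',' ','b','y']
    · simp [pvStepB, pvGJ, pvGO, h]
    · simp [pvStepB, pvGJ, pvGO, h]

-- once seen_order is set, the order clause never changes
theorem foldl_gO_seen (l : List String) (oc : String) : l.foldl pvGO (oc, true) = (oc, true) := by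
  induction l generalizing oc with
  | nil => rfl
  | cons s t ih =>
    simp only [List.foldl_cons, pvGO]
    by_cases h : PySem.Str.find (PySem.Str.lower s) "order by" > -1
    · simp [ih]
    · simp [ih]

-- the first-hit fold computes pvOC (first hit wins)
theorem foldl_gO (l : List String) (oc : String) :
    l.foldl pvGO (oc, false) = (if l.any pvHit then pvOC l else oc, l.any pvHit) := by
  induction l generalizing oc with
  | nil => rfl
  | cons s t ih =>
    simp only [List.foldl_cons, List.any_cons]
    by_cases hc : -1 < PySem.Chars.find (PySem.Chars.lower s.toList) ['o','r','d','e','r',' ','b','y']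
    · have hh : pvHit s = true := by simp [pvHit, hc]
      simp [pvGO, hc, hh, foldl_gO_seen, pvOC]
    · have hh : pvHit s = false := by simp [pvHit, hc]
      simp [pvGO, hc, hh, ih, pvOC]

-- one step of B's joined-string accumulation is pvJoined's combine
theorem pvGJ_eq (j s : String) : pvGJ j s =
    (let idx := PySem.Str.find (PySem.Str.lower s) "order by"
     let body := if idx > -1 then PySem.Str.strip (PySem.Str.slice s none (some idx)) else s
     if body = "" then j
     else if j ≠ "" then "(" ++ body ++ ")" ++ " AND " ++ j
     else "(" ++ body ++ ")") := by
  simp only [pvGJ]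
  by_cases h2 : j = ""
  · subst h2; simp
  · have hl : (")" ++ (" AND " ++ j)) = ") AND " ++ j := by
      rw [← String.append_assoc]
      rw [← String.toList_inj]; simp
    simp [h2, String.append_assoc, hl]

-- folding the joined-string component over the reversed list is pvJoined
theorem foldl_gJ_reverse (ss : List String) : ss.reverse.foldl pvGJ "" = pvJoined ss := by
  rw [List.foldl_reverse]
  induction ss with
  | nil => rfl
  | cons s t ih =>
    rw [List.foldr_cons, pvGJ_eq, ih]
    simp only [pvJoined]

-- A's forward last-wins fold equals the reversed first-hit scan
theorem foldl_oc (ss : List String) (oc : String) :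
    ss.foldl (fun oc s =>
      let idx := PySem.Str.find (PySem.Str.lower s) "order by"
      if idx > -1 then PySem.Str.strip (PySem.Str.slice s (some idx) none) else oc) oc =
    (if ss.any pvHit then pvOC ss.reverse else oc) := by
  induction ss using List.reverseRecOn generalizing oc with
  | nil => simp
  | append_singleton t s ih =>
    rw [List.foldl_append, List.foldl_cons, List.foldl_nil]
    rw [List.reverse_append]
    simp only [List.reverse_cons, List.reverse_nil, List.nil_append, List.singleton_append,
      List.any_append, List.any_cons, List.any_nil]
    by_cases h : pvHit s
    · have hb : pvHit s = true := h
      simp only [pvHit] at h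
      simp at h
      simp [pvOC, h, hb]
    · have h' : ¬ PySem.Str.find (PySem.Str.lower s) "order by" > -1 := by simpa [pvHit] using h
      simp only [pvOC, h']
      rw [ih]
      simp [h]

-- String-level join facts, proved through the Chars definitions
theorem wrap_ne_empty (x : String) : ("(" ++ x ++ ")") ≠ "" := by
  intro h; rw [← String.toList_inj] at h; simp at h

theorem str_join_singleton (sep a : String) : PySem.Str.join sep [a] = a := by
  rw [← String.toList_inj]; simp [PySem.Chars.join_singleton]

theorem str_join_cons_cons (sep a b : String) (l : List String) :
    PySem.Str.join sep (a :: b :: l) = a ++ sep ++ PySem.Str.join sep (b :: l) := by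
  rw [← String.toList_inj]; simp [PySem.Chars.join_cons_cons]

theorem join_wrap_ne (sep x : String) (l : List String) :
    PySem.Str.join sep (("(" ++ x ++ ")") :: l) ≠ "" := by
  cases l with
  | nil => rw [str_join_singleton]; exact wrap_ne_empty x
  | cons b l =>
    rw [str_join_cons_cons]
    intro h; rw [← String.toList_inj] at h; simp at h

-- pvJoined equals A's filter/map/join pipeline
theorem pvJoined_eq (ss : List String) :
    pvJoined ss =
      PySem.Str.join " AND " (((ss.map pvTransf).filter (fun x => x ≠ "")).map (fun x => "(" ++ x ++ ")")) := by
  induction ss with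
  | nil => rfl
  | cons s t ih =>
    simp only [pvJoined, List.map_cons]
    have hbody : (if PySem.Str.find (PySem.Str.lower s) "order by" > -1
        then PySem.Str.strip (PySem.Str.slice s none (some (PySem.Str.find (PySem.Str.lower s) "order by")))
        else s) = pvTransf s := by
      simp [pvTransf]
    rw [hbody]
    by_cases h1 : pvTransf s = ""
    · simp [h1, ih]
    · rw [List.filter_cons_of_pos (by simpa using h1)]
      cases hF : (t.map pvTransf).filter (fun x => x ≠ "") with
      | nil =>
        rw [ih, hF]
        simp only [List.map_cons, List.map_nil]
        rw [if_neg h1]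
        rw [str_join_singleton]
        simp [PySem.Str.join]
      | cons x f =>
        rw [ih, hF]
        simp only [List.map_cons]
        rw [if_neg h1, if_pos (join_wrap_ne " AND " x (f.map (fun x => "(" ++ x ++ ")")))]
        rw [str_join_cons_cons]

-- ===== VERDICT (by name: the statement is the Claim_ definition above) =====
theorem construct_jql_string_from_saved_searches_spec : Claim_equal_construct_jql_string_from_saved_searches := by
  intro ss _
  unfold Spec_construct_jql_string_from_saved_searches
  unfold construct_jql_string_from_saved_searches construct_jql_string_from_saved_searches_alt
  rw [foldl_oc, stepB_split, foldl_gO, foldl_gJ_reverse, pvJoined_eq]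
  simp only [List.any_reverse]
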